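-- pv_equiv track=rewrite | github.com/sum130/codefield | week3/week3_3.py | solution
-- ===== SOURCE A (Python) =====
-- from collections import Counter
--
-- def solution(k, tangerine):
--     answer = 0
--     count = Counter(tangerine)
--     sorted_counts = sorted(count.values(), reverse=True)
--     toatl = 0
--     for i in sorted_counts:
--         toatl += i
--         answer += 1
--         if toatl >= k:
--             break
--     return answer
-- ===== SOURCE B (Python) =====
-- def solution(k, tangerine):
--     count = {}
--     for t in tangerine:
--         count[t] = count.get(t, 0) + 1
--     n = len(tangerine)
--     buckets = [0] * (n + 1)
--     for c in count.values():
--         buckets[c] += 1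
--     answer = 0
--     total = 0
--     for c in range(n, 0, -1):
--         for _ in range(buckets[c]):
--             total += c
--             answer += 1
--             if total >= k:
--                 return answer
--     return answer
-- ===== Notes on version B (the rewrite author's own statement) =====
-- stated objective: alternative
-- what changed: Replaces the comparison sort of the occurrence counts with a counting-sort histogram indexed by count, traversed from the largest count downward with an early return.
import Mathlib
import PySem

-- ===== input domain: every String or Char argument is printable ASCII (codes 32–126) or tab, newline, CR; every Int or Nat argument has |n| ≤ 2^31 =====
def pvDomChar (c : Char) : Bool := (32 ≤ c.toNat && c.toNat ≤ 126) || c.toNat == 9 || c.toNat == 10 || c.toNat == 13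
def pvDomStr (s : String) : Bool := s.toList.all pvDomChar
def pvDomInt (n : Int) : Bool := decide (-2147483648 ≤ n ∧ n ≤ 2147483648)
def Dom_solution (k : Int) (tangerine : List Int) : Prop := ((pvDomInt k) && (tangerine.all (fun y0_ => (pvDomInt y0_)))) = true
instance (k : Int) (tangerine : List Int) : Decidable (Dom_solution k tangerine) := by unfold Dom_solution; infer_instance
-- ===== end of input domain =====

-- B replaces A's comparison sort of the occurrence counts by a count-indexed histogram
-- traversed from the largest count downward (a counting sort); same cost class, different traversal.

-- ===== PORT A =====
-- the for-loop with break over sorted_counts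
def solLoopA (k : Int) (answer total : Int) : List Int → Int
  | [] => answer
  | i :: rest =>
      if total + i ≥ k then answer + 1 else solLoopA k (answer + 1) (total + i) rest

def solution (k : Int) (tangerine : List Int) : Int :=
  let count := PySem.Dict.counter tangerine
  let sorted_counts := PySem.List.sorted count.values (fun x => x) true
  solLoopA k 0 0 sorted_counts

-- ===== PORT B =====
-- inner 'for _ in range(buckets[c])' loop; .inr = early return, .inl = fall through with new (total, answer)
def solInnerB (k c : Int) : Nat → Int → Int → (Int × Int) ⊕ Int
  | 0, total, answer => .inl (total, answer)
  | m + 1, total, answer =>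
      if total + c ≥ k then .inr (answer + 1) else solInnerB k c m (total + c) (answer + 1)

-- outer 'for c in range(n, 0, -1)' loop
def solOuterB (k : Int) (buckets : List Int) (total answer : Int) : List Int → Int
  | [] => answer
  | c :: cs =>
      match solInnerB k c (PySem.List.pyGetD buckets c 0).toNat total answer with
      | .inr ans => ans
      | .inl (t, a) => solOuterB k buckets t a cs

def solution_alt (k : Int) (tangerine : List Int) : Int :=
  let count := tangerine.foldl (fun d x => d.insert x (d.getD x 0 + 1)) PySem.Dict.empty
  let n : Int := tangerine.length
  let buckets := count.values.foldl (fun b c => PySem.List.pySetD b c (PySem.List.pyGetD b c 0 + 1))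
                   (List.replicate (n + 1).toNat 0)
  solOuterB k buckets 0 0 (PySem.List.pyRange n 0 (-1))

-- ===== PRECONDITION & SPEC =====
def Spec_solution (k : Int) (tangerine : List Int) (out : Int) : Prop := out = solution_alt k tangerine
instance (k : Int) (tangerine : List Int) (out : Int) : Decidable (Spec_solution k tangerine out) := by unfold Spec_solution; infer_instance

-- ===== CLAIM (what is proved, stated in full; the proofs are below) =====
def Claim_equal_solution : Prop := ∀ (k : Int) (tangerine : List Int), Dom_solution k tangerine → Spec_solution k tangerine (solution k tangerine)


-- ===== LEMMAS AND PROOFS =====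

-- the sequence of counts that B's double loop effectively traverses
def solExpand (buckets : List Int) (cs : List Int) : List Int :=
  cs.flatMap (fun c => List.replicate (PySem.List.pyGetD buckets c 0).toNat c)

-- B's inner loop = A's loop on a block of equal counts
theorem solInner_eq (k c : Int) : ∀ (m : Nat) (total answer : Int) (rest : List Int),
    solLoopA k answer total (List.replicate m c ++ rest) =
      (match solInnerB k c m total answer with
       | .inl (t, a) => solLoopA k a t rest
       | .inr ans => ans) := by
  intro m
  induction m with
  | zero => intro total answer rest; simp [solInnerB]
  | succ m ih =>
      intro total answer rest
      rw [List.replicate_succ, List.cons_append]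
      show (if total + c ≥ k then answer + 1 else solLoopA k (answer + 1) (total + c) _) = _
      rw [solInnerB]
      by_cases h : total + c ≥ k
      · simp [h]
      · simp only [if_neg h]
        exact ih (total + c) (answer + 1) rest

-- B's outer loop = A's loop on the expanded sequence
theorem solOuter_eq (k : Int) (buckets : List Int) : ∀ (cs : List Int) (total answer : Int),
    solOuterB k buckets total answer cs = solLoopA k answer total (solExpand buckets cs) := by
  intro cs
  induction cs with
  | nil => intro total answer; simp [solOuterB, solExpand, solLoopA]
  | cons c cs ih =>
      intro total answer
      have hE : solExpand buckets (c :: cs)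
          = List.replicate (PySem.List.pyGetD buckets c 0).toNat c ++ solExpand buckets cs := by
        simp [solExpand]
      rw [hE, solInner_eq k c _ total answer (solExpand buckets cs), solOuterB]
      cases h : solInnerB k c (PySem.List.pyGetD buckets c 0).toNat total answer with
      | inl p => cases p with | mk t a => simp [ih]
      | inr ans => simp

-- the histogram fold counts occurrences
theorem solBuckets_getD : ∀ (vs : List Int) (b : List Int) (c : Nat),
    c < b.length → (∀ v ∈ vs, 0 ≤ v ∧ v < (b.length : Int)) →
    PySem.List.pyGetD (vs.foldl (fun b c => PySem.List.pySetD b c (PySem.List.pyGetD b c 0 + 1)) b) (c : Int) 0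
      = PySem.List.pyGetD b (c : Int) 0 + (vs.count (c : Int) : Int) := by
  intro vs
  induction vs with
  | nil => intro b c _ _; simp
  | cons v vs ih =>
      intro b c hc hvs
      obtain ⟨hv0, hvlt⟩ := hvs v (List.mem_cons_self ..)
      have hvnat : v = ((v.toNat : Nat) : Int) := by omega
      have hvlen : v.toNat < b.length := by omega
      rw [List.foldl_cons]
      have hlen : (PySem.List.pySetD b v (PySem.List.pyGetD b v 0 + 1)).length = b.length :=
        PySem.List.length_pySetD ..
      rw [ih _ c (by omega) (fun w hw => by rw [hlen]; exact hvs w (List.mem_cons_of_mem _ hw))]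
      rw [hvnat, PySem.List.pyGetD_pySetD_natCast b v.toNat c _ _ hvlen]
      rw [List.count_cons]
      by_cases h : c = v.toNat
      · subst h
        rw [if_pos rfl, if_pos (by simp)]
        push_cast
        ring
      · rw [if_neg h, if_neg (by simp; omega)]
        push_cast
        ring

-- count of a value in the expanded sequence, for a duplicate-free list of counts
theorem solCount_expand (buckets : List Int) : ∀ (cs : List Int), cs.Nodup → ∀ (a : Int),
    (solExpand buckets cs).count a
      = if a ∈ cs then (PySem.List.pyGetD buckets a 0).toNat else 0 := by
  intro cs
  induction cs with
  | nil => intro _ a; simp [solExpand]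
  | cons c cs ih =>
      intro hnd a
      have hE : solExpand buckets (c :: cs)
          = List.replicate (PySem.List.pyGetD buckets c 0).toNat c ++ solExpand buckets cs := by
        simp [solExpand]
      rw [hE, List.count_append, List.count_replicate, ih hnd.of_cons a]
      by_cases h : a = c
      · subst h
        have : a ∉ cs := (List.nodup_cons.mp hnd).1
        simp [this]
      · have : (c == a) = false := by simp [Ne.symm h]
        simp [this, h]

-- every value of Counter(xs) is between 1 and len(xs)
theorem solValues_bounds (xs : List Int) :
    ∀ v ∈ (PySem.Dict.counter xs).values, 1 ≤ v ∧ v ≤ (xs.length : Int) := by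
  intro v hv
  have hvals : (PySem.Dict.counter xs).values = (PySem.Dict.counter xs).items.map Prod.snd := rfl
  rw [hvals, PySem.Dict.items_counter] at hv
  simp only [List.map_map, List.mem_map, Function.comp] at hv
  obtain ⟨key, hkey, hveq⟩ := hv
  have hmem : key ∈ xs := (PySem.Set.mem_ofList ..).mp hkey
  have h1 : 1 ≤ xs.count key := List.count_pos_iff.mpr hmem
  have h2 : xs.count key ≤ xs.length := List.count_le_length
  constructor <;> (rw [← hveq]; exact_mod_cast (by omega))

-- pyGetD on the all-zero initial bucket list with default 0 is 0
theorem solGetD_replicate_zero (m : Nat) (i : Int) :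
    PySem.List.pyGetD (List.replicate m (0 : Int)) i 0 = 0 := by
  unfold PySem.List.pyGetD
  cases h : PySem.List.pyGet? (List.replicate m (0 : Int)) i with
  | none => rfl
  | some x =>
      have hx : x ∈ List.replicate m (0 : Int) := PySem.List.mem_of_pyGet?_eq_some _ h
      simp_all [List.eq_of_mem_replicate hx]

-- ===== VERDICT (by name: the statement is the Claim_ definition above) =====
theorem solution_spec : Claim_equal_solution := by
  intro k tangerine _
  have hA : solution k tangerine
      = solLoopA k 0 0 (PySem.List.sorted (PySem.Dict.counter tangerine).values (fun x => x) true) := rfl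
  have hB : solution_alt k tangerine
      = solOuterB k ((PySem.Dict.counter tangerine).values.foldl
            (fun b c => PySem.List.pySetD b c (PySem.List.pyGetD b c 0 + 1))
            (List.replicate ((tangerine.length : Int) + 1).toNat 0)) 0 0
          (PySem.List.pyRange (tangerine.length : Int) 0 (-1)) := rfl
  unfold Spec_solution
  rw [hA, hB]
  set vs := (PySem.Dict.counter tangerine).values with hvs
  set n : Int := (tangerine.length : Int) with hn
  have hnn : (n + 1).toNat = tangerine.length + 1 := by omega
  set b0 : List Int := List.replicate (n + 1).toNat (0 : Int) with hb0
  set buckets := vs.foldl (fun b c => PySem.List.pySetD b c (PySem.List.pyGetD b c 0 + 1)) b0 with hbk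
  rw [solOuter_eq]
  have hb0len : b0.length = tangerine.length + 1 := by rw [hb0, List.length_replicate, hnn]
  have hbnds : ∀ v ∈ vs, 0 ≤ v ∧ v < (b0.length : Int) := by
    intro v hv
    obtain ⟨h1, h2⟩ := solValues_bounds tangerine v hv
    rw [hb0len]; push_cast; omega
  have hR : PySem.List.pyRange n 0 (-1) = (PySem.List.pyRange 1 (n + 1) 1).reverse := by
    rw [PySem.List.pyRange_neg_one_eq_reverse]
    norm_num
  have hRnodup : (PySem.List.pyRange n 0 (-1)).Nodup := by
    rw [hR]; exact List.nodup_reverse.mpr (PySem.List.nodup_pyRange_one ..)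
  -- the bucket lookup is the count in vs, for indices 1..n
  have hbucket : ∀ (a : Int), 0 < a → a ≤ n →
      PySem.List.pyGetD buckets a 0 = (vs.count a : Int) := by
    intro a ha0 han
    have hanat : a = ((a.toNat : Nat) : Int) := by omega
    rw [hbk, hanat, solBuckets_getD vs b0 a.toNat (by omega) hbnds,
        solGetD_replicate_zero]
    simp
  -- permutation: the expansion has the same counts as vs
  have hperm : (solExpand buckets (PySem.List.pyRange n 0 (-1))).Perm vs := by
    rw [List.perm_iff_count]
    intro a
    rw [solCount_expand buckets _ hRnodup a]
    by_cases hmem : a ∈ PySem.List.pyRange n 0 (-1)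
    · obtain ⟨h1, h2⟩ := (PySem.List.mem_pyRange_neg_one ..).mp hmem
      rw [if_pos hmem, hbucket a h1 h2]
      simp
    · rw [if_neg hmem]
      have : a ∉ vs := by
        intro hav
        obtain ⟨h1, h2⟩ := solValues_bounds tangerine a hav
        exact hmem ((PySem.List.mem_pyRange_neg_one ..).mpr ⟨by omega, by omega⟩)
      exact (List.count_eq_zero.mpr this).symm
  -- the expansion is non-increasing
  have hsortE : List.Pairwise (fun a b => b ≤ a) (solExpand buckets (PySem.List.pyRange n 0 (-1))) := by
    unfold solExpand
    rw [List.flatMap_def, List.pairwise_flatten]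
    constructor
    · intro l hl
      simp only [List.mem_map] at hl
      obtain ⟨c, _, rfl⟩ := hl
      exact List.pairwise_replicate.mpr (Or.inr le_rfl)
    · rw [List.pairwise_map]
      have hgt : List.Pairwise (fun a b => b < a) (PySem.List.pyRange n 0 (-1)) := by
        rw [hR, List.pairwise_reverse]
        exact PySem.List.pairwise_lt_pyRange_one ..
      refine hgt.imp_of_mem ?_
      intro c1 c2 _ _ hlt x hx y hy
      rw [List.eq_of_mem_replicate hx, List.eq_of_mem_replicate hy]
      exact le_of_lt hlt
  -- the two sequences fed to the shared loop are equal
  have hsortA : List.Pairwise (fun a b => b ≤ a) (PySem.List.sorted vs (fun x => x) true) :=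
    PySem.List.sorted_pairwise_rev vs (fun x => x)
  have hseq : PySem.List.sorted vs (fun x => x) true = solExpand buckets (PySem.List.pyRange n 0 (-1)) := by
    refine List.eq_of_perm_of_sorted (fun a b _ _ h1 h2 => le_antisymm h2 h1) hsortA hsortE ?_
    exact (PySem.List.sorted_perm ..).trans hperm.symm
  rw [hseq]
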